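-- pv_equiv track=rewrite | github.com/Janemasha/python_lessons | oop_part3/tasks.py | cyclic_sequence
-- ===== SOURCE A (Python) =====
-- def cyclic_sequence(finish):
--     start_number = 0
--     previous_number = 1
--     while start_number <= finish:
--         yield previous_number
--         if previous_number < 3:
--             next_number = previous_number + 1
--         else:
--             next_number = 1
--         previous_number = next_number
--         start_number += 1
-- ===== SOURCE B (Python) =====
-- def cyclic_sequence(finish):
--     count = finish + 1
--     reps = (count + 2) // 3
--     yield from ([1, 2, 3] * reps)[:max(count, 0)]
-- ===== Notes on version B (the rewrite author's own statement) =====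
-- stated objective: alternative
-- what changed: Replaces the stateful while-loop tracking previous_number with a bulk construction: repeat the block [1,2,3] ceil((finish+1)/3) times and slice to length finish+1.
import Mathlib
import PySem

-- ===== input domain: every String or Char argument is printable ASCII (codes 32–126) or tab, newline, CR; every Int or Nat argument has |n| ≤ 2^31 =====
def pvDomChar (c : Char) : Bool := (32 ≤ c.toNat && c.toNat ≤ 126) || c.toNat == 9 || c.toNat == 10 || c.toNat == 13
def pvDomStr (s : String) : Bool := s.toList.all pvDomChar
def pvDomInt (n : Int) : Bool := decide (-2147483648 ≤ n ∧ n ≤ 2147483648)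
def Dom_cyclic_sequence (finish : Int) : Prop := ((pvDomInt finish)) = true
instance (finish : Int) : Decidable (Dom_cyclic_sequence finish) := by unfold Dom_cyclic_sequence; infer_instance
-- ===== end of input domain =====

-- B is an alternative construction: repeat the block [1,2,3] ceil((finish+1)/3) times and slice to length finish+1, instead of a stateful loop.

-- ===== PORT A =====
-- while start_number <= finish: yield previous_number; update previous_number via the branch
def cyclicSeqLoopA (start_number previous_number finish : Int) : List Int :=
  if _h : start_number ≤ finish then
    previous_number ::
      cyclicSeqLoopA (start_number + 1)
        (if previous_number < 3 then previous_number + 1 else 1) finish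
  else []
termination_by (finish + 1 - start_number).toNat
decreasing_by omega

def cyclic_sequence (finish : Int) : List Int :=
  cyclicSeqLoopA 0 1 finish

-- ===== PORT B =====
-- count = finish + 1; reps = (count + 2) // 3; ([1,2,3] * reps)[:max(count, 0)]
def cyclic_sequence_alt (finish : Int) : List Int :=
  ((List.replicate (PySem.Int.floordiv (finish + 1 + 2) 3).toNat ([1, 2, 3] : List Int)).flatten).take
    (max (finish + 1) 0).toNat

-- ===== PRECONDITION & SPEC =====
def Spec_cyclic_sequence (finish : Int) (out : List Int) : Prop := out = cyclic_sequence_alt finish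
instance (finish : Int) (out : List Int) : Decidable (Spec_cyclic_sequence finish out) := by unfold Spec_cyclic_sequence; infer_instance

-- ===== CLAIM (what is proved, stated in full; the proofs are below) =====
def Claim_equal_cyclic_sequence : Prop := ∀ (finish : Int), Dom_cyclic_sequence finish → Spec_cyclic_sequence finish (cyclic_sequence finish)

-- ===== LEMMAS AND PROOFS =====
-- A's loop with prev = start % 3 + 1 yields (start+j) % 3 + 1 for j < n remaining steps.
theorem cyclicSeqLoopA_eq_map (finish : Int) :
    ∀ (n : Nat) (start prev : Int), (finish + 1 - start).toNat = n → prev = start % 3 + 1 →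
      cyclicSeqLoopA start prev finish
        = (List.range n).map (fun (j : Nat) => (start + (j : Int)) % 3 + 1) := by
  intro n
  induction n with
  | zero =>
    intro start prev hn _
    rw [cyclicSeqLoopA, dif_neg (by omega)]
    rfl
  | succ n ih =>
    intro start prev hn hp
    rw [cyclicSeqLoopA, dif_pos (by omega)]
    have h1 : start % 3 = 0 ∨ start % 3 = 1 ∨ start % 3 = 2 := by omega
    have hnext : (if prev < 3 then prev + 1 else 1) = (start + 1) % 3 + 1 := by
      rcases h1 with h1 | h1 | h1 <;> simp [hp, h1] <;> omega
    rw [hnext, ih (start + 1) _ (by omega) rfl, List.range_succ_eq_map]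
    simp only [List.map_cons, List.map_map]
    congr 1
    · omega
    · apply List.map_congr_left
      intro j _
      simp only [Function.comp_apply]
      congr 1
      push_cast
      ring_nf

-- Flattened replicated block is the modulo pattern on range (3*k).
theorem flatten_replicate_block :
    ∀ (k : Nat), (List.replicate k ([1, 2, 3] : List Int)).flatten
      = (List.range (3 * k)).map (fun (j : Nat) => ((j : Int)) % 3 + 1) := by
  intro k
  induction k with
  | zero => simp
  | succ k ih =>
    have h3 : 3 * (k + 1) = 3 + 3 * k := by ring
    have h2 : ((List.range (3 * k)).map (fun x => 3 + x)).map
        (fun (j : Nat) => ((j : Int)) % 3 + 1)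
        = (List.range (3 * k)).map (fun (j : Nat) => ((j : Int)) % 3 + 1) := by
      rw [List.map_map]
      apply List.map_congr_left
      intro j _
      simp only [Function.comp_apply]
      push_cast
      omega
    rw [List.replicate_succ, List.flatten_cons, ih, h3, List.range_add, List.map_append, h2]
    congr 1

-- ===== VERDICT (by name: the statement is the Claim_ definition above) =====
theorem cyclic_sequence_spec : Claim_equal_cyclic_sequence := by
  intro finish _
  unfold Spec_cyclic_sequence cyclic_sequence cyclic_sequence_alt
  rw [cyclicSeqLoopA_eq_map finish (finish + 1 - 0).toNat 0 1 rfl (by decide)]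
  rw [flatten_replicate_block]
  rw [← List.map_take, List.take_range]
  have hmin : min (max (finish + 1) 0).toNat
      (3 * ((PySem.Int.floordiv (finish + 1 + 2) 3).toNat)) = (finish + 1 - 0).toNat := by
    rw [PySem.Int.floordiv_eq_ediv_of_pos (by omega)]
    omega
  rw [hmin]
  apply List.map_congr_left
  intro j _
  simp
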